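-- pv_equiv track=rewrite | github.com/drtamarojgreen/greenhouse_org | tools/canvas_ml/cnn_layer.py | apply_padding
-- ===== SOURCE A (Python) =====
-- def apply_padding(image, padding=1):
--     """Adds zero padding to the 2D image."""
--     height = len(image)
--     width = len(image[0])
--     new_width = width + 2 * padding
--     padded = [[0] * new_width for _ in range(padding)]
--
--     for row in image:
--         padded.append([0] * padding + row + [0] * padding)
--
--     padded.extend([[0] * new_width for _ in range(padding)])
--     return padded
-- ===== SOURCE B (Python) =====
-- def apply_padding(image, padding=1):
--     """Adds zero padding to the 2D image (allocate-by-index construction)."""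
--     height = len(image)
--     width = len(image[0])
--     out = []
--     for i in range(height + 2 * padding):
--         if i < padding or i >= height + padding:
--             out.append([0] * (width + 2 * padding))
--         else:
--             row = image[i - padding]
--             out.append([0 if (j < padding or j >= padding + len(row)) else row[j - padding]
--                         for j in range(len(row) + 2 * padding)])
--     return out
-- ===== Notes on version B (the rewrite author's own statement) =====
-- stated objective: alternative
-- what changed: Replaces A's per-row concatenation with append/extend by a single index-driven construction: one loop over all output row indices that either emits a fresh zero row or builds the padded row element-by-element from output column indices.
-- outside the precondition, e.g. on apply_padding([[1, 2]], -1): A returns [[1, 2]], B returns []; on apply_padding([], 1): A raises IndexError, B raises IndexError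
import Mathlib
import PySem

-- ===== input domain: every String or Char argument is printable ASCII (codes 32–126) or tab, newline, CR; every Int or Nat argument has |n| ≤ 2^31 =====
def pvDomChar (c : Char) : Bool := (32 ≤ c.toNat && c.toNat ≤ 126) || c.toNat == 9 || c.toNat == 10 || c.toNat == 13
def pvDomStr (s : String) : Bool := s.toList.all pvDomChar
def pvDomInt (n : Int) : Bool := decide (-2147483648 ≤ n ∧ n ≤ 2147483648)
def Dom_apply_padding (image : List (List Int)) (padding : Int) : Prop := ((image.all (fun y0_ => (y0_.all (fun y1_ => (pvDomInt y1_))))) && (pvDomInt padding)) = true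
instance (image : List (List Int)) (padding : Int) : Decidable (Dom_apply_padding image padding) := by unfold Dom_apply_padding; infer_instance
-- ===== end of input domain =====

-- B replaces A's per-row concatenation (append rows, extend) by one index-driven loop over
-- output row/column indices; equivalence proved for non-empty images and padding ≥ 0.


-- ===== PORT A =====
def apply_padding (image : List (List Int)) (padding : Int) : List (List Int) :=
  match PySem.List.pyGet? image 0 with
  | none => []   -- image[0] raises IndexError on the empty image; excluded by Pre_
  | some row0 =>
    let width : Int := (row0.length : Int)
    let new_width : Int := width + 2 * padding
    let padded : List (List Int) :=
      (PySem.List.pyRange 0 padding 1).map (fun _ => PySem.List.pyRepeat [(0 : Int)] new_width)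
    let padded :=
      image.foldl (fun acc row =>
        acc ++ [PySem.List.pyRepeat [(0 : Int)] padding ++ row ++ PySem.List.pyRepeat [(0 : Int)] padding]) padded
    padded ++ (PySem.List.pyRange 0 padding 1).map (fun _ => PySem.List.pyRepeat [(0 : Int)] new_width)

-- ===== PORT B =====
def apply_padding_alt (image : List (List Int)) (padding : Int) : List (List Int) :=
  match PySem.List.pyGet? image 0 with
  | none => []   -- image[0] raises IndexError on the empty image; excluded by Pre_
  | some row0 =>
    let height : Int := (image.length : Int)
    let width : Int := (row0.length : Int)
    (PySem.List.pyRange 0 (height + 2 * padding) 1).map (fun i =>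
      if i < padding ∨ i ≥ height + padding then
        PySem.List.pyRepeat [(0 : Int)] (width + 2 * padding)
      else
        let row := (PySem.List.pyGet? image (i - padding)).getD []
        (PySem.List.pyRange 0 ((row.length : Int) + 2 * padding) 1).map (fun j =>
          if j < padding ∨ j ≥ padding + (row.length : Int) then (0 : Int)
          else (PySem.List.pyGet? row (j - padding)).getD 0))

-- ===== PRECONDITION & SPEC =====
-- Pre_ excludes the empty image (A raises IndexError on image[0]) and negative padding, where
-- A's full-width rows are an accident of Python's negative list multiplication and B's shrunken
-- grid is equally defensible for an unspecified corner.
def Pre_apply_padding (image : List (List Int)) (padding : Int) : Prop :=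
  image ≠ [] ∧ 0 ≤ padding
instance (image : List (List Int)) (padding : Int) : Decidable (Pre_apply_padding image padding) := by
  unfold Pre_apply_padding; infer_instance
def pvWitness_apply_padding : List (List Int) × Int := ([[1, 2], [3, 4]], 1)

def Spec_apply_padding (image : List (List Int)) (padding : Int) (out : List (List Int)) : Prop := out = apply_padding_alt image padding
instance (image : List (List Int)) (padding : Int) (out : List (List Int)) : Decidable (Spec_apply_padding image padding out) := by unfold Spec_apply_padding; infer_instance

-- ===== CLAIM (what is proved, stated in full; the proofs are below) =====
def Claim_equal_apply_padding : Prop := ∀ (image : List (List Int)) (padding : Int), Dom_apply_padding image padding → Pre_apply_padding image padding → Spec_apply_padding image padding (apply_padding image padding)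

-- ===== LEMMAS AND PROOFS =====

-- a foldl that appends one mapped element per item is init ++ map
theorem foldl_append_map {α β : Type} (xs : List α) (f : α → β) (init : List β) :
    xs.foldl (fun acc x => acc ++ [f x]) init = init ++ xs.map f := by
  induction xs generalizing init with
  | nil => simp
  | cons x xs ih => simp [List.foldl, ih, List.append_assoc]

-- mapping over a shifted integer range equals mapping over the list it indexes
theorem map_pyRange_eq_map {α β : Type} (xs : List α) (a : Int) (f : Int → β) (g : α → β)
    (h : ∀ (k : ℕ) (hk : k < xs.length), f (a + k) = g xs[k]) :
    (PySem.List.pyRange a (a + xs.length) 1).map f = xs.map g := by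
  induction xs generalizing a with
  | nil => simp [PySem.List.pyRange_one_eq_nil]
  | cons x xs ih =>
    have hlt : a < a + (x :: xs).length := by
      have : (0 : Int) < ((x :: xs).length : Int) := by exact_mod_cast (by simp : 0 < (x :: xs).length)
      omega
    rw [PySem.List.pyRange_one_cons hlt]
    have h0 : f a = g x := by
      have := h 0 (by simp)
      simpa using this
    have hshift : a + ((x :: xs).length : Int) = (a + 1) + (xs.length : Int) := by
      rw [List.length_cons]; push_cast; ring
    rw [hshift]
    have hrest := ih (a + 1) (fun k hk => by
      have := h (k + 1) (by simpa using Nat.succ_lt_succ hk)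
      have harith : a + ((k + 1 : ℕ) : Int) = a + 1 + (k : Int) := by push_cast; ring
      rw [harith] at this
      simpa using this)
    simp [h0, hrest]

-- mapping a locally-constant function over an integer range gives a replicate
theorem map_pyRange_const {β : Type} (a b : Int) (f : Int → β) (c : β)
    (h : ∀ i : Int, a ≤ i → i < b → f i = c) :
    (PySem.List.pyRange a b 1).map f = List.replicate (b - a).toNat c := by
  refine List.eq_replicate_iff.mpr ⟨by simp [PySem.List.length_pyRange_one], ?_⟩
  intro x hx
  obtain ⟨i, hi, rfl⟩ := List.mem_map.mp hx
  rw [PySem.List.mem_pyRange_one] at hi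
  exact h i hi.1 hi.2

-- the inner row of B equals A\'s concatenated row
theorem inner_row_eq (row : List Int) (padding : Int) (hp : 0 ≤ padding) :
    ((PySem.List.pyRange 0 ((row.length : Int) + 2 * padding) 1).map (fun j =>
        if j < padding ∨ j ≥ padding + (row.length : Int) then (0 : Int)
        else (PySem.List.pyGet? row (j - padding)).getD 0))
      = PySem.List.pyRepeat [(0 : Int)] padding ++ row ++ PySem.List.pyRepeat [(0 : Int)] padding := by
  have hL0 : (0 : Int) ≤ (row.length : Int) := by positivity
  have hsplit1 : PySem.List.pyRange 0 ((row.length : Int) + 2 * padding) 1 =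
      PySem.List.pyRange 0 padding 1 ++ PySem.List.pyRange padding ((row.length : Int) + 2 * padding) 1 :=
    PySem.List.pyRange_one_append 0 padding _ hp (by omega)
  have hsplit2 : PySem.List.pyRange padding ((row.length : Int) + 2 * padding) 1 =
      PySem.List.pyRange padding (padding + (row.length : Int)) 1 ++
      PySem.List.pyRange (padding + (row.length : Int)) ((row.length : Int) + 2 * padding) 1 :=
    PySem.List.pyRange_one_append padding (padding + (row.length : Int)) _ (by omega) (by omega)
  rw [hsplit1, hsplit2, List.map_append, List.map_append, List.append_assoc]
  congr 1
  · -- left zeros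
    rw [map_pyRange_const 0 padding _ (0 : Int) (fun i h1 h2 => by simp [show i < padding from h2])]
    simp [PySem.List.pyRepeat_singleton]
  congr 1
  · -- the row itself
    refine (map_pyRange_eq_map row padding _ id (fun k hk => ?_)).trans (by simp)
    have h1 : ¬ (padding + (k : Int) < padding ∨ padding + (k : Int) ≥ padding + (row.length : Int)) := by
      have : (k : Int) < (row.length : Int) := by exact_mod_cast hk
      omega
    have hidx : padding + (k : Int) - padding = (k : Int) := by ring
    simp only [if_neg h1, hidx, PySem.List.pyGet?_natCast, List.getElem?_eq_getElem hk,
      Option.getD_some, id_eq]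
  · -- right zeros
    rw [map_pyRange_const (padding + (row.length : Int)) ((row.length : Int) + 2 * padding) _ (0 : Int)
      (fun i h1 h2 => by simp [show i ≥ padding + (row.length : Int) from h1])]
    have : ((row.length : Int) + 2 * padding - (padding + (row.length : Int))) = padding := by ring
    rw [this]
    simp [PySem.List.pyRepeat_singleton]

-- ===== VERDICT (by name: the statement is the Claim_ definition above) =====
theorem apply_padding_spec : Claim_equal_apply_padding := by
  intro image padding _ hpre
  obtain ⟨hne, hp⟩ := hpre
  unfold Spec_apply_padding apply_padding apply_padding_alt
  obtain ⟨row0, rest, rfl⟩ : ∃ r rs, image = r :: rs := by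
    cases image with
    | nil => exact absurd rfl hne
    | cons r rs => exact ⟨r, rs, rfl⟩
  rw [PySem.List.pyGet?_zero_cons]
  simp only
  have hH0 : (0 : Int) < ((row0 :: rest).length : Int) := by
    exact_mod_cast (by simp : 0 < (row0 :: rest).length)
  have hsplit1 : PySem.List.pyRange 0 (((row0 :: rest).length : Int) + 2 * padding) 1 =
      PySem.List.pyRange 0 padding 1 ++
      PySem.List.pyRange padding (((row0 :: rest).length : Int) + 2 * padding) 1 :=
    PySem.List.pyRange_one_append 0 padding _ hp (by omega)
  have hsplit2 : PySem.List.pyRange padding (((row0 :: rest).length : Int) + 2 * padding) 1 =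
      PySem.List.pyRange padding (padding + ((row0 :: rest).length : Int)) 1 ++
      PySem.List.pyRange (padding + ((row0 :: rest).length : Int)) (((row0 :: rest).length : Int) + 2 * padding) 1 :=
    PySem.List.pyRange_one_append padding (padding + ((row0 :: rest).length : Int)) _ (by omega) (by omega)
  rw [foldl_append_map, hsplit1, hsplit2, List.map_append, List.map_append, List.append_assoc]
  congr 1
  · -- top zero rows
    apply List.map_congr_left
    intro i hi
    rw [PySem.List.mem_pyRange_one] at hi
    rw [if_pos (Or.inl hi.2 : i < padding ∨ i ≥ ((row0 :: rest).length : Int) + padding)]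
  congr 1
  · -- middle rows
    refine (map_pyRange_eq_map (row0 :: rest) padding _ _ (fun k hk => ?_)).symm
    have hkH : (k : Int) < ((row0 :: rest).length : Int) := by exact_mod_cast hk
    have h1 : ¬ (padding + (k : Int) < padding ∨
        padding + (k : Int) ≥ ((row0 :: rest).length : Int) + padding) := by omega
    have hidx : padding + (k : Int) - padding = (k : Int) := by ring
    simp only [h1, if_false]
    rw [hidx]
    simp only [PySem.List.pyGet?_natCast, List.getElem?_eq_getElem hk, Option.getD_some]
    exact inner_row_eq (row0 :: rest)[k] padding hp
  · -- bottom zero rows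
    rw [map_pyRange_const (padding + ((row0 :: rest).length : Int))
      (((row0 :: rest).length : Int) + 2 * padding) _
      (PySem.List.pyRepeat [(0 : Int)] (((row0.length : Int)) + 2 * padding))
      (fun i h1 h2 => by
        rw [if_pos (Or.inr (by omega) : i < padding ∨ i ≥ ((row0 :: rest).length : Int) + padding)])]
    have hq : (((row0 :: rest).length : Int) + 2 * padding -
        (padding + ((row0 :: rest).length : Int))) = padding := by ring
    rw [hq]
    refine (map_pyRange_const 0 padding _ _ (fun i _ _ => rfl)).trans ?_
    simp
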